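-- pv_equiv track=rewrite | github.com/pocc/pre-commit-hooks | hooks/clang_format.py | format_as_diff
-- ===== SOURCE A (Python) =====
-- def format_as_diff(lines):
--     """Function to remove empty diff lines, convert to bash diff format
--     Python uses +/-, so convert that to </>
--
--     For example:
--         < this is
--         < expected
--         ---
--         > and this is actual
--     """
--     output = []
--     left_toggle = True  # to imitate bash diff
--     for line in lines:
--         if line[0] == "+":
--             if not left_toggle:
--                 output += ["\n"]
--             output += ["< " + line[1:]]
--             left_toggle = True
--         elif line[0] == "-":
--             if left_toggle:
--                 output += ["---"]
--             output += ["> " + line[1:]]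
--             left_toggle = False
--     return output
-- ===== SOURCE B (Python) =====
-- def format_as_diff(lines):
--     """Run-grouped rewrite: extract (sign, rest) pairs once, then walk
--     consecutive runs of equal sign, emitting the separator once per run."""
--     sides = [(l[0], l[1:]) for l in lines if l[0] in "+-"]
--     output = []
--     prev = "+"  # initial left_toggle=True behaves like a preceding '+'
--     i = 0
--     while i < len(sides):
--         sign = sides[i][0]
--         j = i
--         while j < len(sides) and sides[j][0] == sign:
--             j += 1
--         if sign == "+":
--             if prev == "-":
--                 output.append("\n")
--             output.extend("< " + rest for _, rest in sides[i:j])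
--         else:
--             if prev == "+":
--                 output.append("---")
--             output.extend("> " + rest for _, rest in sides[i:j])
--         prev = sign
--         i = j
--     return output
-- ===== Notes on version B (the rewrite author's own statement) =====
-- stated objective: alternative
-- what changed: B first extracts the (sign, rest) pairs in one comprehension and then walks consecutive runs of equal sign with an inner scan, emitting each run's separator once from the carried previous sign, instead of A's single per-line loop with a boolean toggle.
import Mathlib
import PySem

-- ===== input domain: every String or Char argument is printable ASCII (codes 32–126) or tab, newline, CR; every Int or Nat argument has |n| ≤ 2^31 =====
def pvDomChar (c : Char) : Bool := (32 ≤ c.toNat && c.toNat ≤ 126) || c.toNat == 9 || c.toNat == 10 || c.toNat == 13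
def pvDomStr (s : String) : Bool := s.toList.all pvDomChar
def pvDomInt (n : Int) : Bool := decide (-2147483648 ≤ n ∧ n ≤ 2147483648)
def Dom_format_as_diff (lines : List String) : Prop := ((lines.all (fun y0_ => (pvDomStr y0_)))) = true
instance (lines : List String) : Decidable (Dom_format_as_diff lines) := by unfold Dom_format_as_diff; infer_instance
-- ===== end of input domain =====

-- B is an alternative decomposition (filter to (sign,rest) pairs once, then walk runs of
-- equal sign), same cost; return value only, no mutation.

-- ===== PORT A =====
-- A's single loop: state = (accumulated output, left_toggle); lines whose first char is
-- neither '+' nor '-' are skipped (the empty line, on which Python raises, is outside Pre_).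
def fmtLoopA : List String → List String → Bool → List String
  | [], out, _ => out
  | l :: rest, out, tog =>
    match l.toList with
    | [] => fmtLoopA rest out tog  -- unreachable under Pre_ (Python raises IndexError)
    | c :: cs =>
      if c = '+' then
        fmtLoopA rest (out ++ (if !tog then ["\n"] else []) ++ ["< " ++ String.ofList cs]) true
      else if c = '-' then
        fmtLoopA rest (out ++ (if tog then ["---"] else []) ++ ["> " ++ String.ofList cs]) false
      else fmtLoopA rest out tog

def format_as_diff (lines : List String) : List String := fmtLoopA lines [] true

-- ===== PORT B =====
-- sides = [(l[0], l[1:]) for l in lines if l[0] in "+-"]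
def sideOf (l : String) : Option (String × String) :=
  match l.toList with
  | [] => none  -- unreachable under Pre_ (Python raises IndexError)
  | c :: cs => if c = '+' ∨ c = '-' then some (String.ofList [c], String.ofList cs) else none

-- the while loop over runs: the head of a run plus takeWhile is the inner `while j…` scan,
-- dropWhile is the advance `i = j`
def emitRuns (prev : String) : List (String × String) → List String
  | [] => []
  | (s, r) :: tl =>
    let run := (s, r) :: tl.takeWhile (fun p => p.1 == s)
    (if s == "+" then
       (if prev == "-" then ["\n"] else []) ++ run.map (fun p => "< " ++ p.2)
     else
       (if prev == "+" then ["---"] else []) ++ run.map (fun p => "> " ++ p.2))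
    ++ emitRuns s (tl.dropWhile (fun p => p.1 == s))
termination_by sides => sides.length
decreasing_by
  simp only [List.length_cons]
  exact Nat.lt_succ_of_le (List.length_dropWhile_le _ _)

def format_as_diff_alt (lines : List String) : List String :=
  emitRuns "+" (lines.filterMap sideOf)

-- ===== PRECONDITION & SPEC =====
-- Pre_ excludes exactly the inputs on which A raises: any empty line makes `line[0]` an IndexError.
def Pre_format_as_diff (lines : List String) : Prop := ∀ l ∈ lines, l ≠ ""
instance (lines : List String) : Decidable (Pre_format_as_diff lines) := by
  unfold Pre_format_as_diff; infer_instance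
def pvWitness_format_as_diff : List String := ["+one", "+two", "-three", "x", "-four", "+five"]
def Spec_format_as_diff (lines : List String) (out : List String) : Prop := out = format_as_diff_alt lines
instance (lines : List String) (out : List String) : Decidable (Spec_format_as_diff lines out) := by unfold Spec_format_as_diff; infer_instance

-- ===== CLAIM (what is proved, stated in full; the proofs are below) =====
def Claim_equal_format_as_diff : Prop := ∀ (lines : List String), Dom_format_as_diff lines → Pre_format_as_diff lines → Spec_format_as_diff lines (format_as_diff lines)

-- ===== LEMMAS AND PROOFS =====

-- per-pair emission (what A does for one relevant line, with prev = sign-form of the toggle)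
def emit1 (prev : String) (p : String × String) : List String :=
  if p.1 == "+" then (if prev == "-" then ["\n"] else []) ++ ["< " ++ p.2]
  else (if prev == "+" then ["---"] else []) ++ ["> " ++ p.2]

def stepFold (prev : String) : List (String × String) → List String
  | [] => []
  | p :: rest => emit1 prev p ++ stepFold p.1 rest

lemma emitRuns_eq_stepFold_aux (n : Nat) (sides : List (String × String)) (prev : String)
    (hn : sides.length ≤ n) : emitRuns prev sides = stepFold prev sides := by
  induction n generalizing sides prev with
  | zero =>
    have : sides = [] := List.eq_nil_of_length_eq_zero (Nat.le_zero.mp hn)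
    subst this; simp [emitRuns, stepFold]
  | succ n ih =>
    match sides with
    | [] => simp [emitRuns, stepFold]
    | (s, r) :: tl =>
    have ihrest : emitRuns s (tl.dropWhile (fun p => p.1 == s))
        = stepFold s (tl.dropWhile (fun p => p.1 == s)) :=
      ih _ _ (le_trans (List.length_dropWhile_le _ _) (Nat.le_of_succ_le_succ hn))
    have hsplit : stepFold prev ((s, r) :: tl)
        = emit1 prev (s, r) ++ (tl.takeWhile (fun p => p.1 == s)).map
            (fun p => (if s == "+" then "< " else "> ") ++ p.2)
          ++ stepFold s (tl.dropWhile (fun p => p.1 == s)) := by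
      have : ∀ t : List (String × String),
          stepFold s t = (t.takeWhile (fun p => p.1 == s)).map
            (fun p => (if s == "+" then "< " else "> ") ++ p.2)
            ++ stepFold s (t.dropWhile (fun p => p.1 == s)) := by
        intro t
        induction t with
        | nil => simp [stepFold]
        | cons q t iht =>
          obtain ⟨q1, q2⟩ := q
          by_cases hq : q1 = s
          · subst hq
            simp only [stepFold, List.takeWhile_cons, List.dropWhile_cons, beq_self_eq_true,
              if_true, List.map_cons]
            rw [iht]
            by_cases hs : q1 = "+"
            · subst hs; simp [emit1]
            · have hs' : (q1 == "+") = false := by simpa using hs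
              simp [emit1, hs']
          · have hq' : (q1 == s) = false := by simpa using hq
            simp [List.takeWhile_cons, List.dropWhile_cons, hq', stepFold]
      simp only [stepFold, this tl, List.append_assoc]
    rw [hsplit, ← ihrest, emitRuns, emit1]
    by_cases hs : s = "+"
    · subst hs; simp
    · have hs' : (s == "+") = false := by simpa using hs
      simp [hs']

lemma emitRuns_eq_stepFold (sides : List (String × String)) (prev : String) :
    emitRuns prev sides = stepFold prev sides :=
  emitRuns_eq_stepFold_aux sides.length sides prev le_rfl

-- A's loop, restated over the filtered pair list
lemma fmtLoopA_eq (lines : List String) (out : List String) (tog : Bool)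
    (hne : ∀ l ∈ lines, l ≠ "") :
    fmtLoopA lines out tog = out ++ stepFold (if tog then "+" else "-") (lines.filterMap sideOf) := by
  induction lines generalizing out tog with
  | nil => simp [fmtLoopA, stepFold]
  | cons l rest ih =>
    have hl : l ≠ "" := hne l (by simp)
    have hrest : ∀ x ∈ rest, x ≠ "" := fun x hx => hne x (by simp [hx])
    have hlist : l.toList ≠ [] := fun h => hl (String.toList_eq_nil_iff.mp h)
    obtain ⟨c, cs, hcc⟩ : ∃ c cs, l.toList = c :: cs := by
      cases hlt : l.toList with
      | nil => exact absurd hlt hlist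
      | cons c cs => exact ⟨c, cs, rfl⟩
    by_cases hp : c = '+'
    · subst hp
      have : sideOf l = some ("+", String.ofList cs) := by
        simp [sideOf, hcc]
      simp only [fmtLoopA, hcc, if_pos rfl, List.filterMap_cons, this, ih _ _ hrest]
      cases tog <;> simp [stepFold, emit1]
    · by_cases hm : c = '-'
      · subst hm
        have : sideOf l = some ("-", String.ofList cs) := by
          simp [sideOf, hcc]
        simp only [fmtLoopA, hcc, List.filterMap_cons, this, ih _ _ hrest]
        have h1 : ('-' = '+') = False := by simp
        cases tog <;> simp [h1, stepFold, emit1]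
      · have : sideOf l = none := by
          simp [sideOf, hcc, hp, hm]
        simp only [fmtLoopA, hcc, List.filterMap_cons, this, ih _ _ hrest, if_neg hp, if_neg hm]

-- ===== VERDICT (by name: the statement is the Claim_ definition above) =====
theorem format_as_diff_spec : Claim_equal_format_as_diff := by
  intro lines _ hpre
  unfold Spec_format_as_diff format_as_diff format_as_diff_alt
  rw [fmtLoopA_eq lines [] true hpre, emitRuns_eq_stepFold]
  simp
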